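-- pv_equiv track=rewrite | github.com/alexandraback/datacollection | solutions_2449486_0/Python/Lovro/b.py | solve
-- ===== SOURCE A (Python) =====
-- def solve(R, C, mat):
--     rows = [0] * R
--     cols = [0] * C
--     for i in range(R):
--         for j in range(C):
--             rows[i] = max(rows[i], mat[i][j])
--             cols[j] = max(cols[j], mat[i][j])
--
--     for i in range(R):
--         for j in range(C):
--             if min(rows[i], cols[j]) != mat[i][j]:
--                 return 'NO'
--
--     return 'YES'
-- ===== SOURCE B (Python) =====
-- def solve(R, C, mat):
--     # A cell is achievable iff it is the maximum of its row or of its column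
--     # (with the mower's 0 baseline); check every cell directly, no precomputation.
--     for i in range(R):
--         for j in range(C):
--             v = mat[i][j]
--             if v != max([0] + mat[i][:C]) and v != max([0] + [mat[k][j] for k in range(R)]):
--                 return 'NO'
--     return 'YES'
-- ===== Notes on version B (the rewrite author's own statement) =====
-- stated objective: alternative
-- what changed: Replaces A's two staged passes (mutating rowmax/colmax arrays, then comparing each cell to min(rowmax,colmax)) by a direct per-cell brute-force test of a different characterization: a matrix is valid iff every cell equals the maximum of its row or the maximum of its column (0 baseline); no auxiliary arrays and no min. Pre_ excludes only the inputs where A raises IndexError (fewer than R rows, or a row among the first R shorter than C, when R>0 and C>0).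
import Mathlib
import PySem

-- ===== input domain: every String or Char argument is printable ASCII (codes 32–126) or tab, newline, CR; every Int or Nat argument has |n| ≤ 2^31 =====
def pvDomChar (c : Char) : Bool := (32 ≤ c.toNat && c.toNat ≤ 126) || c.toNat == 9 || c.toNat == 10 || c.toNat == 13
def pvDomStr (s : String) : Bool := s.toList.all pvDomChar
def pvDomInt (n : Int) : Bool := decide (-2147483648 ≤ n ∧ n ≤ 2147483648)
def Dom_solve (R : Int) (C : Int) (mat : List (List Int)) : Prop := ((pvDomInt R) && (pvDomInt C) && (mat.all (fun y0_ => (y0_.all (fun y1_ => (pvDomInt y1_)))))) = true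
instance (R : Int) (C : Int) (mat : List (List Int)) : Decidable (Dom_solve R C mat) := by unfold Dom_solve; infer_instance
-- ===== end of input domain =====

-- B replaces A's two staged passes (mutated rowmax/colmax arrays, then min(rowmax,colmax)
-- comparison) by a direct per-cell brute-force test of a different characterization: every
-- cell must equal the maximum of its row or of its column (0 baseline). Objective: alternative.

-- ===== PORT A =====
def solve (R : Int) (C : Int) (mat : List (List Int)) : String :=
  let rows := List.replicate R.toNat (0 : Int)
  let cols := List.replicate C.toNat (0 : Int)
  let st := (PySem.List.pyRange 0 R 1).foldl (fun (st : List Int × List Int) i =>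
      (PySem.List.pyRange 0 C 1).foldl (fun (st : List Int × List Int) j =>
        (PySem.List.pySetD st.1 i (max (PySem.List.pyGetD st.1 i 0)
            (PySem.List.pyGetD (PySem.List.pyGetD mat i []) j 0)),
         PySem.List.pySetD st.2 j (max (PySem.List.pyGetD st.2 j 0)
            (PySem.List.pyGetD (PySem.List.pyGetD mat i []) j 0)))) st) (rows, cols)
  if (PySem.List.pyRange 0 R 1).any (fun i =>
       (PySem.List.pyRange 0 C 1).any (fun j =>
         min (PySem.List.pyGetD st.1 i 0) (PySem.List.pyGetD st.2 j 0)
           != PySem.List.pyGetD (PySem.List.pyGetD mat i []) j 0)) then "NO" else "YES"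

-- ===== PORT B =====
-- per-cell check: return 'NO' at the first cell that is neither the max of its
-- (width-C) row nor the max of its (height-R) column; max([0]+xs) = xs.foldl max 0
def solve_alt (R : Int) (C : Int) (mat : List (List Int)) : String :=
  if (PySem.List.pyRange 0 R 1).any (fun i =>
      (PySem.List.pyRange 0 C 1).any (fun j =>
        let v := PySem.List.pyGetD (PySem.List.pyGetD mat i []) j 0
        (v != (PySem.List.slice (PySem.List.pyGetD mat i []) none (some C)).foldl max 0) &&
        (v != ((PySem.List.pyRange 0 R 1).map (fun k =>
            PySem.List.pyGetD (PySem.List.pyGetD mat k []) j 0)).foldl max 0)))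
  then "NO" else "YES"

-- ===== PRECONDITION & SPEC =====
-- Pre_solve excludes exactly the inputs where A raises IndexError: when R > 0 and C > 0 the
-- matrix must have at least R rows and each of its first R rows at least C entries.
def Pre_solve (R : Int) (C : Int) (mat : List (List Int)) : Prop :=
  0 < R → 0 < C → (R ≤ (mat.length : Int) ∧ ∀ row ∈ mat.take R.toNat, C ≤ (row.length : Int))
instance (R : Int) (C : Int) (mat : List (List Int)) : Decidable (Pre_solve R C mat) := by
  unfold Pre_solve; infer_instance
def pvWitness_solve : Int × Int × List (List Int) := (2, 2, [[1, 2], [2, 2]])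
def Spec_solve (R : Int) (C : Int) (mat : List (List Int)) (out : String) : Prop := out = solve_alt R C mat
instance (R : Int) (C : Int) (mat : List (List Int)) (out : String) : Decidable (Spec_solve R C mat out) := by unfold Spec_solve; infer_instance

-- ===== CLAIM (what is proved, stated in full; the proofs are below) =====
def Claim_equal_solve : Prop := ∀ (R : Int) (C : Int) (mat : List (List Int)), Dom_solve R C mat → Pre_solve R C mat → Spec_solve R C mat (solve R C mat)

-- ===== LEMMAS AND PROOFS =====

theorem aux_setD (xs : List Int) (i v : Int) (h : 0 ≤ i) :
    PySem.List.pySetD xs i v = xs.set i.toNat v := by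
  simp [PySem.List.pySetD_of_nonneg, h]

theorem aux_getD {α : Type} (xs : List α) (i : Int) (d : α) (h0 : 0 ≤ i) (h : i < (xs.length : Int)) :
    PySem.List.pyGetD xs i d = xs[i.toNat]'(by omega) := by
  simp [PySem.List.pyGetD_eq_getElem, h0, h]

theorem take_succ' {α : Type} (l : List α) (n : Nat) (h : n < l.length) :
    l.take (n + 1) = l.take n ++ [l[n]] := by
  rw [List.take_add_one, List.getElem?_eq_getElem h]
  rfl

-- helper: state of A's column array after processing columns [0,b) of one row r
def colAcc (cols r : List Int) (b : Nat) : List Int :=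
  cols.mapIdx (fun j c => if j < b then max c (r.getD j 0) else c)

-- helper: A's rows array after processing the first k rows of grid g
def rowsF (g : List (List Int)) (n k : Nat) : List Int :=
  (List.range n).map (fun i => if i < k then (g.getD i []).foldl max 0 else 0)

-- helper: A's cols array after processing the first k rows of grid g
def colsF (g : List (List Int)) (m k : Nat) : List Int :=
  (List.range m).map (fun j => ((g.take k).map (fun row => row.getD j 0)).foldl max 0)

theorem length_colAcc (cols r : List Int) (b : Nat) : (colAcc cols r b).length = cols.length := by
  simp [colAcc]

theorem getElem_colAcc (cols r : List Int) (b : Nat) (j : Nat) (hj : j < cols.length) :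
    (colAcc cols r b)[j]'(by simp [length_colAcc, hj]) =
      if j < b then max cols[j] (r.getD j 0) else cols[j] := by
  simp [colAcc]

theorem colAcc_zero (cols r : List Int) : colAcc cols r 0 = cols := by
  apply List.ext_getElem (by simp [length_colAcc])
  intro j h1 h2
  simp [colAcc]

theorem length_rowsF (g : List (List Int)) (n k : Nat) : (rowsF g n k).length = n := by
  simp [rowsF]

theorem length_colsF (g : List (List Int)) (m k : Nat) : (colsF g m k).length = m := by
  simp [colsF]

theorem getElem_rowsF (g : List (List Int)) (n k i : Nat) (h : i < n) :
    (rowsF g n k)[i]'(by simp [length_rowsF, h]) =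
      if i < k then (g.getD i []).foldl max 0 else 0 := by
  simp [rowsF]

theorem getElem_colsF (g : List (List Int)) (m k j : Nat) (h : j < m) :
    (colsF g m k)[j]'(by simp [length_colsF, h]) =
      ((g.take k).map (fun row => row.getD j 0)).foldl max 0 := by
  simp [colsF]

theorem rowsF_zero (g : List (List Int)) (n : Nat) :
    rowsF g n 0 = List.replicate n 0 := by
  apply List.ext_getElem (by simp [length_rowsF])
  intro j h1 h2
  simp [rowsF]

theorem colsF_zero (g : List (List Int)) (m : Nat) :
    colsF g m 0 = List.replicate m 0 := by
  apply List.ext_getElem (by simp [length_colsF])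
  intro j h1 h2
  simp [colsF]

-- one row of A's first pass (inner j-loop), characterized
theorem inner_fold (i : Int) (hi : 0 ≤ i) (rows cols r : List Int)
    (hir : i.toNat < rows.length) :
    ∀ b : Nat, b ≤ cols.length → b ≤ r.length →
    (PySem.List.pyRange 0 (b : Int) 1).foldl
      (fun (st : List Int × List Int) j =>
        (PySem.List.pySetD st.1 i (max (PySem.List.pyGetD st.1 i 0) (r.getD j.toNat 0)),
         PySem.List.pySetD st.2 j (max (PySem.List.pyGetD st.2 j 0) (r.getD j.toNat 0))))
      (rows, cols)
    = (rows.set i.toNat ((r.take b).foldl max (rows.getD i.toNat 0)), colAcc cols r b) := by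
  intro b
  induction b with
  | zero =>
    intro _ _
    rw [Nat.cast_zero, PySem.List.pyRange_one_eq_nil le_rfl]
    simp [colAcc_zero, List.getElem?_eq_getElem hir, List.set_getElem_self]
  | succ b ih =>
    intro hbc hbr
    have hbc' : b < cols.length := by omega
    have hbr' : b < r.length := by omega
    rw [show (((b + 1 : Nat)) : Int) = (b : Int) + 1 by omega,
        PySem.List.pyRange_one_succ_right (by positivity), List.foldl_append,
        ih (by omega) (by omega)]
    simp only [List.foldl_cons, List.foldl_nil, Int.toNat_natCast, Prod.mk.injEq]
    constructor
    · rw [aux_setD _ _ _ hi,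
         aux_getD _ _ _ hi (by simp only [List.length_set]; omega),
         List.getElem_set_self, List.set_set, take_succ' r b hbr', List.foldl_append]
      simp [List.getElem?_eq_getElem hbr']
    · rw [PySem.List.pySetD_natCast, PySem.List.pyGetD_natCast,
         List.getD_eq_getElem _ 0 (by simp only [length_colAcc]; omega),
         getElem_colAcc cols r b b hbc']
      simp only [lt_irrefl, if_false]
      apply List.ext_getElem (by simp [length_colAcc])
      intro j hj1 hj2
      have hjc : j < cols.length := by simpa [length_colAcc] using hj1
      rw [List.getElem_set, getElem_colAcc cols r b j hjc, getElem_colAcc cols r (b + 1) j hjc]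
      split_ifs with h1 h2 h3 <;> first | rfl | omega | (subst h1; rfl)

theorem outer_fold (mat : List (List Int)) (n m : Nat)
    (hn : n ≤ mat.length) (hrow : ∀ row ∈ mat.take n, m ≤ row.length) :
    ∀ k : Nat, k ≤ n →
    (PySem.List.pyRange 0 (k : Int) 1).foldl (fun (st : List Int × List Int) i =>
      (PySem.List.pyRange 0 (m : Int) 1).foldl (fun (st : List Int × List Int) j =>
        (PySem.List.pySetD st.1 i (max (PySem.List.pyGetD st.1 i 0)
            (PySem.List.pyGetD (PySem.List.pyGetD mat i []) j 0)),
         PySem.List.pySetD st.2 j (max (PySem.List.pyGetD st.2 j 0)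
            (PySem.List.pyGetD (PySem.List.pyGetD mat i []) j 0)))) st)
      (List.replicate n 0, List.replicate m 0)
    = (rowsF ((mat.take n).map (fun row => row.take m)) n k,
       colsF ((mat.take n).map (fun row => row.take m)) m k) := by
  intro k
  induction k with
  | zero =>
    intro _
    rw [Nat.cast_zero, PySem.List.pyRange_one_eq_nil le_rfl]
    simp [rowsF_zero, colsF_zero]
  | succ k ih =>
    intro hk1
    have hkn : k < n := by omega
    have hkmat : k < mat.length := by omega
    have hglen : ((mat.take n).map (fun row => row.take m)).length = n := by
      simp; omega
    have hrowk : m ≤ (mat[k]'hkmat).length := by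
      apply hrow
      rw [show mat[k]'hkmat = (mat.take n)[k]'(by simp; omega) from (List.getElem_take ..).symm]
      exact List.getElem_mem _
    have hgk : ((mat.take n).map (fun row => row.take m))[k]'(by omega) = (mat[k]'hkmat).take m := by
      simp [List.getElem_take]
    rw [show (((k + 1 : Nat)) : Int) = (k : Int) + 1 by omega,
        PySem.List.pyRange_one_succ_right (by positivity), List.foldl_append,
        ih (by omega)]
    simp only [List.foldl_cons, List.foldl_nil]
    have hcong :
        (PySem.List.pyRange 0 (m : Int) 1).foldl (fun (st : List Int × List Int) j =>
          (PySem.List.pySetD st.1 (k : Int) (max (PySem.List.pyGetD st.1 (k : Int) 0)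
              (PySem.List.pyGetD (PySem.List.pyGetD mat (k : Int) []) j 0)),
           PySem.List.pySetD st.2 j (max (PySem.List.pyGetD st.2 j 0)
              (PySem.List.pyGetD (PySem.List.pyGetD mat (k : Int) []) j 0))))
          (rowsF ((mat.take n).map (fun row => row.take m)) n k,
           colsF ((mat.take n).map (fun row => row.take m)) m k)
        = (PySem.List.pyRange 0 (m : Int) 1).foldl (fun (st : List Int × List Int) j =>
          (PySem.List.pySetD st.1 (k : Int) (max (PySem.List.pyGetD st.1 (k : Int) 0)
              (((mat[k]'hkmat).take m).getD j.toNat 0)),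
           PySem.List.pySetD st.2 j (max (PySem.List.pyGetD st.2 j 0)
              (((mat[k]'hkmat).take m).getD j.toNat 0))))
          (rowsF ((mat.take n).map (fun row => row.take m)) n k,
           colsF ((mat.take n).map (fun row => row.take m)) m k) := by
      apply PySem.List.foldl_congr_mem
      intro acc j hj
      obtain ⟨hj0, hjm⟩ := (PySem.List.mem_pyRange_one).1 hj
      have hjm' : j.toNat < m := by omega
      have e1 : PySem.List.pyGetD mat (k : Int) [] = mat[k]'hkmat := by
        rw [aux_getD _ _ _ (by positivity) (by omega)]
        simp
      have e2 : PySem.List.pyGetD (mat[k]'hkmat) j 0 = ((mat[k]'hkmat).take m).getD j.toNat 0 := by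
        rw [aux_getD _ _ _ hj0 (by omega),
            List.getD_eq_getElem _ 0 (by simp; omega), List.getElem_take]
      rw [e1, e2]
    rw [hcong, inner_fold (k : Int) (by positivity) _ _ _
          (by rw [Int.toNat_natCast, length_rowsF]; omega) m
          (by rw [length_colsF]) (by simp; omega)]
    simp only [Int.toNat_natCast, Prod.mk.injEq]
    constructor
    · rw [List.getD_eq_getElem _ 0 (by rw [length_rowsF]; omega),
         getElem_rowsF _ _ _ _ hkn]
      simp only [lt_irrefl, if_false, List.take_take, min_self]
      apply List.ext_getElem (by simp [length_rowsF])
      intro idx hi1 hi2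
      have hin : idx < n := by simpa [length_rowsF] using hi2
      rw [List.getElem_set, getElem_rowsF _ _ _ _ hin, getElem_rowsF _ _ _ _ hin]
      have hgdk : ((mat.take n).map (fun row => row.take m)).getD k [] = (mat[k]'hkmat).take m := by
        rw [List.getD_eq_getElem _ _ (by omega), hgk]
      split_ifs with h1 h2 h3 <;> first | rfl | omega | (subst h1; rw [hgdk])
    · apply List.ext_getElem (by simp [length_colAcc, length_colsF, length_colsF])
      intro j hj1 hj2
      have hjm : j < m := by simpa [length_colsF] using hj2
      have hjc : j < (colsF ((mat.take n).map (fun row => row.take m)) m k).length := by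
        rw [length_colsF]; omega
      rw [show (colAcc (colsF ((mat.take n).map (fun row => row.take m)) m k) ((mat[k]'hkmat).take m) m)[j]'hj1 =
            (colAcc (colsF ((mat.take n).map (fun row => row.take m)) m k) ((mat[k]'hkmat).take m) m)[j]'(by rw [length_colAcc]; exact hjc) from rfl,
          getElem_colAcc _ _ m j hjc, getElem_colsF _ _ _ _ hjm, getElem_colsF _ _ _ _ hjm]
      have hkg : k < ((mat.take n).map (fun row => row.take m)).length := by omega
      rw [take_succ' _ k hkg, List.map_append, List.foldl_append, hgk]
      simp only [List.map_cons, List.map_nil, List.foldl_cons, List.foldl_nil, hjm, if_true]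

theorem any_congr_mem {α : Type} (l : List α) (p q : α → Bool)
    (h : ∀ x ∈ l, p x = q x) : l.any p = l.any q := by
  induction l with
  | nil => rfl
  | cons a t ih => simp_all [List.any_cons]

theorem le_init_foldl_max (l : List Int) (a : Int) : a ≤ l.foldl max a := by
  induction l generalizing a with
  | nil => simp
  | cons b t ih => exact le_trans (le_max_left a b) (ih (max a b))

theorem le_foldl_max (l : List Int) : ∀ (a x : Int), x ∈ l → x ≤ l.foldl max a := by
  induction l with
  | nil => intro a x h; cases h
  | cons b t ih =>
    intro a x h
    rcases List.mem_cons.1 h with h1 | h1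
    · subst h1
      exact le_trans (le_max_right a x) (le_init_foldl_max t _)
    · exact ih _ _ h1

-- the per-cell boolean equivalence: when v is ≤ both maxima,
-- min(rm,cm) ≠ v  ⟺  v ≠ rm ∧ v ≠ cm
theorem cell_eq (rm cm v : Int) (h1 : v ≤ rm) (h2 : v ≤ cm) :
    (min rm cm != v) = ((v != rm) && (v != cm)) := by
  by_cases e1 : v = rm
  · subst e1
    rw [min_eq_left h2]
    simp
  · by_cases e2 : v = cm
    · subst e2
      rw [min_eq_right h1]
      simp
    · have hrm : (v != rm) = true := bne_iff_ne.2 e1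
      have hcm : (v != cm) = true := bne_iff_ne.2 e2
      have hmin : (min rm cm != v) = true := by
        apply bne_iff_ne.2
        have : v < rm := lt_of_le_of_ne h1 e1
        have : v < cm := lt_of_le_of_ne h2 e2
        omega
      rw [hrm, hcm, hmin]
      rfl

theorem main_pos (n m : Nat) (mat : List (List Int))
    (hn : n ≤ mat.length) (hrow : ∀ row ∈ mat.take n, m ≤ row.length) :
    solve (n : Int) (m : Int) mat = solve_alt (n : Int) (m : Int) mat := by
  have hst := outer_fold mat n m hn hrow n le_rfl
  simp only [solve, solve_alt, Int.toNat_natCast, hst]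
  set g := (mat.take n).map (fun row => row.take m) with hg
  have hglen : g.length = n := by simp [hg]; omega
  refine if_congr ?_ rfl rfl
  have hcond :
      (PySem.List.pyRange 0 (n : Int) 1).any (fun i =>
        (PySem.List.pyRange 0 (m : Int) 1).any (fun j =>
          min (PySem.List.pyGetD ((rowsF g n n, colsF g m n)).1 i 0)
              (PySem.List.pyGetD ((rowsF g n n, colsF g m n)).2 j 0)
            != PySem.List.pyGetD (PySem.List.pyGetD mat i []) j 0))
      = (PySem.List.pyRange 0 (n : Int) 1).any (fun i =>
        (PySem.List.pyRange 0 (m : Int) 1).any (fun j =>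
          let v := PySem.List.pyGetD (PySem.List.pyGetD mat i []) j 0
          (v != (PySem.List.slice (PySem.List.pyGetD mat i []) none (some (m : Int))).foldl max 0) &&
          (v != ((PySem.List.pyRange 0 (n : Int) 1).map (fun k =>
              PySem.List.pyGetD (PySem.List.pyGetD mat k []) j 0)).foldl max 0))) := by
    apply any_congr_mem
    intro i hi
    dsimp only
    obtain ⟨hi0, hin⟩ := (PySem.List.mem_pyRange_one).1 hi
    apply any_congr_mem
    intro j hj
    dsimp only
    obtain ⟨hj0, hjm⟩ := (PySem.List.mem_pyRange_one).1 hj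
    have hinat : i.toNat < n := by omega
    have hjnat : j.toNat < m := by omega
    have himat : i.toNat < mat.length := by omega
    have hmem : mat[i.toNat]'himat ∈ mat.take n := by
      rw [show mat[i.toNat]'himat = (mat.take n)[i.toNat]'(by simp; omega) from (List.getElem_take ..).symm]
      exact List.getElem_mem _
    have hjrow : j.toNat < (mat[i.toNat]'himat).length := lt_of_lt_of_le hjnat (hrow _ hmem)
    have hgi : g.getD i.toNat [] = (mat[i.toNat]'himat).take m := by
      rw [List.getD_eq_getElem _ _ (by omega)]
      simp [hg, List.getElem_take]
    have emi : PySem.List.pyGetD mat i [] = mat[i.toNat]'himat := by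
      rw [aux_getD _ _ _ hi0 (by omega)]
    have ev : PySem.List.pyGetD (PySem.List.pyGetD mat i []) j 0 = (g.getD i.toNat []).getD j.toNat 0 := by
      rw [emi, aux_getD _ _ _ hj0 (by omega), hgi,
          List.getD_eq_getElem _ _ (by simp [List.length_take]; omega), List.getElem_take]
    -- B's row maximum equals A's rowsF entry
    have erm : (PySem.List.slice (PySem.List.pyGetD mat i []) none (some (m : Int))).foldl max 0
        = (g.getD i.toNat []).foldl max 0 := by
      rw [emi, PySem.List.slice_to_natCast, hgi]
    have ermA : PySem.List.pyGetD (rowsF g n n) i 0 = (g.getD i.toNat []).foldl max 0 := by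
      rw [aux_getD _ _ _ hi0 (by rw [length_rowsF]; omega), getElem_rowsF _ _ _ _ hinat]
      simp [hinat]
    -- B's column list equals A's column list
    have ecl : ((PySem.List.pyRange 0 (n : Int) 1).map (fun k =>
          PySem.List.pyGetD (PySem.List.pyGetD mat k []) j 0))
        = g.map (fun row => row.getD j.toNat 0) := by
      rw [PySem.List.pyRange_one, show (((n : Int)) - 0).toNat = n by omega, List.map_map]
      apply List.ext_getElem (by simp [hglen])
      intro k hk1 hk2
      have hkn : k < n := by simpa using hk1
      have hkmat : k < mat.length := by omega
      have hmemk : mat[k]'hkmat ∈ mat.take n := by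
        rw [show mat[k]'hkmat = (mat.take n)[k]'(by simp; omega) from (List.getElem_take ..).symm]
        exact List.getElem_mem _
      have hjrowk : j.toNat < (mat[k]'hkmat).length := lt_of_lt_of_le hjnat (hrow _ hmemk)
      have egk : g[k]'(by omega) = (mat[k]'hkmat).take m := by
        simp [hg, List.getElem_take]
      simp only [List.getElem_map, List.getElem_range, Function.comp]
      simp only [zero_add]
      rw [aux_getD mat _ _ (by positivity) (by omega)]
      simp only [Int.toNat_natCast]
      rw [aux_getD _ _ _ hj0 (by omega), egk,
          List.getD_eq_getElem _ _ (by simp [List.length_take]; omega), List.getElem_take]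
    have ecmA : PySem.List.pyGetD (colsF g m n) j 0 = (g.map (fun row => row.getD j.toNat 0)).foldl max 0 := by
      rw [aux_getD _ _ _ hj0 (by rw [length_colsF]; omega), getElem_colsF _ _ _ _ hjnat,
          ← hglen, List.take_length]
    -- the cell value is bounded by both maxima
    have hlen_gi : j.toNat < (g.getD i.toNat []).length := by
      rw [hgi]
      simp only [List.length_take]
      omega
    have hvrow : (g.getD i.toNat []).getD j.toNat 0 ≤ (g.getD i.toNat []).foldl max 0 := by
      apply le_foldl_max
      rw [List.getD_eq_getElem (g.getD i.toNat []) 0 hlen_gi]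
      exact List.getElem_mem _
    have hvcol : (g.getD i.toNat []).getD j.toNat 0 ≤ (g.map (fun row => row.getD j.toNat 0)).foldl max 0 := by
      apply le_foldl_max
      have : g.getD i.toNat [] = g[i.toNat]'(by omega) := List.getD_eq_getElem _ _ (by omega)
      rw [this, show (g[i.toNat]'(by omega)).getD j.toNat 0
            = (g.map (fun row => row.getD j.toNat 0))[i.toNat]'(by simp [hglen]; omega) by simp]
      exact List.getElem_mem _
    rw [ermA, ecmA, ev, erm, ecl]
    exact cell_eq _ _ _ hvrow hvcol
  rw [hcond]

-- ===== VERDICT (by name: the statement is the Claim_ definition above) =====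
theorem solve_spec : Claim_equal_solve := by
  intro R C mat _ hpre
  unfold Spec_solve
  by_cases hR : 0 < R
  · by_cases hC : 0 < C
    · obtain ⟨hlen, hrowI⟩ := hpre hR hC
      rw [show R = ((R.toNat : Nat) : Int) from (Int.toNat_of_nonneg hR.le).symm,
          show C = ((C.toNat : Nat) : Int) from (Int.toNat_of_nonneg hC.le).symm]
      apply main_pos
      · omega
      · intro row hr
        have := hrowI row hr
        omega
    · have hC0 : C ≤ 0 := by omega
      simp [solve, solve_alt, PySem.List.pyRange_one_eq_nil hC0]
  · have hR0 : R ≤ 0 := by omega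
    simp [solve, solve_alt, PySem.List.pyRange_one_eq_nil hR0]
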